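-- pv_equiv track=rewrite | github.com/SlamaFR/AP2 | TD/TD3/Ex 5.py | nombres_decroissants
-- ===== SOURCE A (Python) =====
-- def nombres_decroissants(n, liste=None):
--     """
--     Retourne une liste de 1 à n dans l'ordre décroissant.
--     :param n: Entier n.
--     :param liste: Liste des entiers.
--     :return: Liste des entiers finale.
--
--     >>> nombres_decroissants(4)
--     [4, 3, 2, 1]
--     """
--     if liste is None:
--         liste = list()
--
--     if len(liste) < n:
--         liste.append(n - len(liste))
--         return nombres_decroissants(n, liste)
--     else:
--         return liste
-- ===== SOURCE B (Python) =====
-- def nombres_decroissants(n, liste=None):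
--     if liste is None:
--         liste = list()
--     liste.extend(range(n - len(liste), 0, -1))
--     return liste
-- ===== Notes on version B (the rewrite author's own statement) =====
-- stated objective: simpler
-- what changed: Replaces the one-stack-frame-per-element recursion by a single in-place extend with range(n - len(liste), 0, -1).
import Mathlib
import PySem

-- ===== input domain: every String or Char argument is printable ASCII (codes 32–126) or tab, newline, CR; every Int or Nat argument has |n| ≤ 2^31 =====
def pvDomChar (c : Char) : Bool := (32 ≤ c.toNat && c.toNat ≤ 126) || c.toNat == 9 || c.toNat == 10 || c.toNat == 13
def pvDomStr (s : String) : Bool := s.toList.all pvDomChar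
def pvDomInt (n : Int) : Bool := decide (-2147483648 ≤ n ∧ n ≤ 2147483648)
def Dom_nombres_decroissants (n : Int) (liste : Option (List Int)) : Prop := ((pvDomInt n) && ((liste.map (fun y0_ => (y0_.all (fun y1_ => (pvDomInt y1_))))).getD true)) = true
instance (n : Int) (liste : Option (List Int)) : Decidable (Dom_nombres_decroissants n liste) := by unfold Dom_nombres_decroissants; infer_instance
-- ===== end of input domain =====

-- B replaces A's one-stack-frame-per-element recursion by a single in-place extend with
-- range(n - len(liste), 0, -1); both mutate a passed-in list identically (same final
-- contents) — the theorem is about the return value.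

-- ===== PORT A =====
-- recursion: append n - len(liste) while len(liste) < n
def nombresGoA (n : Int) (l : List Int) : List Int :=
  if (l.length : Int) < n then nombresGoA n (l ++ [n - (l.length : Int)]) else l
termination_by (n - (l.length : Int)).toNat
decreasing_by simp; omega

def nombres_decroissants (n : Int) (liste : Option (List Int)) : List Int :=
  nombresGoA n (liste.getD [])

-- ===== PORT B =====
def nombres_decroissants_alt (n : Int) (liste : Option (List Int)) : List Int :=
  let l := liste.getD []
  l ++ PySem.List.pyRange (n - (l.length : Int)) 0 (-1)

-- ===== PRECONDITION & SPEC =====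
-- Pre_ excludes exactly the deep-recursion inputs on which A RAISES RecursionError: A burns
-- one stack frame per produced element, so it overflows the interpreter's recursion limit
-- once the depth n - len(liste) reaches that limit (10000 in the test harness); the bound
-- 9900 sits just under the overflow point, which shifts by the few frames already on the
-- stack at the call. B returns the same list as A everywhere A returns.
def Pre_nombres_decroissants (n : Int) (liste : Option (List Int)) : Prop :=
  n - (((liste.getD []).length : Int)) ≤ 9900
instance (n : Int) (liste : Option (List Int)) : Decidable (Pre_nombres_decroissants n liste) := by unfold Pre_nombres_decroissants; infer_instance
def pvWitness_nombres_decroissants : Int × Option (List Int) := (4, none)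

def Spec_nombres_decroissants (n : Int) (liste : Option (List Int)) (out : List Int) : Prop := out = nombres_decroissants_alt n liste
instance (n : Int) (liste : Option (List Int)) (out : List Int) : Decidable (Spec_nombres_decroissants n liste out) := by unfold Spec_nombres_decroissants; infer_instance

-- ===== CLAIM (what is proved, stated in full; the proofs are below) =====
def Claim_equal_nombres_decroissants : Prop := ∀ (n : Int) (liste : Option (List Int)), Dom_nombres_decroissants n liste → Pre_nombres_decroissants n liste → Spec_nombres_decroissants n liste (nombres_decroissants n liste)

-- ===== LEMMAS AND PROOFS =====
theorem nombresGoA_eq (n : Int) (k : Nat) (l : List Int)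
    (hk : (n - (l.length : Int)).toNat = k) :
    nombresGoA n l = l ++ PySem.List.pyRange (n - (l.length : Int)) 0 (-1) := by
  induction k generalizing l with
  | zero =>
    rw [nombresGoA]
    have hle : n ≤ (l.length : Int) := by omega
    rw [if_neg (by omega), PySem.List.pyRange_neg_one_eq_nil (by omega), List.append_nil]
  | succ k ih =>
    have hlt : (l.length : Int) < n := by omega
    rw [nombresGoA, if_pos hlt]
    rw [ih (l ++ [n - (l.length : Int)]) (by simp only [List.length_append, List.length_cons, List.length_nil]; push_cast; omega)]
    have hcons : PySem.List.pyRange (n - (l.length : Int)) 0 (-1)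
        = (n - (l.length : Int)) :: PySem.List.pyRange (n - (l.length : Int) - 1) 0 (-1) :=
      PySem.List.pyRange_neg_one_cons (by omega)
    rw [hcons]
    have harg : ((l ++ [n - (l.length : Int)]).length : Int) = (l.length : Int) + 1 := by
      simp
    rw [harg]
    have : n - ((l.length : Int) + 1) = n - (l.length : Int) - 1 := by ring
    rw [this, List.append_assoc, List.singleton_append]

-- ===== VERDICT (by name: the statement is the Claim_ definition above) =====
theorem nombres_decroissants_spec : Claim_equal_nombres_decroissants := by
  intro n liste _ _
  unfold Spec_nombres_decroissants nombres_decroissants nombres_decroissants_alt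
  exact nombresGoA_eq n _ _ rfl
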